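-- pv_equiv track=rewrite | github.com/jmitchell35/public-RTC | tools/markdown_to_pptx.py | body_font_size
-- ===== SOURCE A (Python) =====
-- def body_font_size(paragraphs: list[str]) -> int:
--     non_empty = [item for item in paragraphs if item]
--     if len(non_empty) >= 10:
--         return 1600
--     if len(non_empty) >= 8:
--         return 1800
--     if len(non_empty) >= 6:
--         return 2000
--     return 2200
-- ===== SOURCE B (Python) =====
-- def body_font_size(paragraphs: list[str]) -> int:
--     count = sum(1 for p in paragraphs if p)
--     return 2200 - 200 * max(0, min(3, (count - 4) // 2))
-- ===== Notes on version B (the rewrite author's own statement) =====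
-- stated objective: simpler
-- what changed: Replaces the filtered-list build plus if-cascade with a single counting pass and one closed-form arithmetic expression (2200 - 200*clamp((count-4)//2, 0, 3)).
import Mathlib
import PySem

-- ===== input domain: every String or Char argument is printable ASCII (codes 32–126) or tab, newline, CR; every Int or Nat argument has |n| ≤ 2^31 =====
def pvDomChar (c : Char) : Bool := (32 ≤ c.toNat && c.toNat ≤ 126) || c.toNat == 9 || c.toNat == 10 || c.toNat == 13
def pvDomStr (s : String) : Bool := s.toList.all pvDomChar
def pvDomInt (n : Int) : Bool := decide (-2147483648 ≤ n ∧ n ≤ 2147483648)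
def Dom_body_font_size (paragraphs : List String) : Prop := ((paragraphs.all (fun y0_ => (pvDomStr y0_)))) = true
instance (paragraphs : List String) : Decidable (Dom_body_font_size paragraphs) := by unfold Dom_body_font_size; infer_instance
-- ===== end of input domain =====

-- B replaces A's filtered-list build and if-cascade by one counting fold and a closed-form clamp expression (simpler).

-- ===== PORT A =====
def body_font_size (paragraphs : List String) : Int :=
  let non_empty := paragraphs.filter (fun item => item ≠ "")
  if (non_empty.length : Int) ≥ 10 then 1600
  else if (non_empty.length : Int) ≥ 8 then 1800
  else if (non_empty.length : Int) ≥ 6 then 2000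
  else 2200

-- ===== PORT B =====
def body_font_size_alt (paragraphs : List String) : Int :=
  let count : Int := paragraphs.foldl (fun acc p => if p ≠ "" then acc + 1 else acc) 0
  2200 - 200 * max 0 (min 3 (PySem.Int.floordiv (count - 4) 2))

-- ===== PRECONDITION & SPEC =====
def Spec_body_font_size (paragraphs : List String) (out : Int) : Prop := out = body_font_size_alt paragraphs
instance (paragraphs : List String) (out : Int) : Decidable (Spec_body_font_size paragraphs out) := by unfold Spec_body_font_size; infer_instance

-- ===== CLAIM (what is proved, stated in full; the proofs are below) =====
def Claim_equal_body_font_size : Prop := ∀ (paragraphs : List String), Dom_body_font_size paragraphs → Spec_body_font_size paragraphs (body_font_size paragraphs)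

-- ===== LEMMAS AND PROOFS =====

-- B's counting fold equals the length of A's filtered list.
theorem pv_count_eq_filter_len (paragraphs : List String) (acc : Int) :
    paragraphs.foldl (fun acc p => if p ≠ "" then acc + 1 else acc) acc
      = acc + ((paragraphs.filter (fun item => item ≠ "")).length : Int) := by
  induction paragraphs generalizing acc with
  | nil => simp
  | cons h t ih =>
    rw [List.foldl_cons, ih, List.filter_cons]
    by_cases hh : h = "" <;> simp [hh] <;> push_cast <;> omega

-- ===== VERDICT (by name: the statement is the Claim_ definition above) =====
theorem body_font_size_spec : Claim_equal_body_font_size := by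
  intro paragraphs _
  unfold Spec_body_font_size body_font_size body_font_size_alt
  dsimp only
  rw [pv_count_eq_filter_len, PySem.Int.floordiv_eq_ediv_of_pos (by norm_num : (0:Int) < 2)]
  omega
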